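-- pv_equiv track=rewrite | github.com/nilologikraft/pythonfromscratch | listings/chapter 12/12.02 - Recognizing LDC.py | ldc
-- ===== SOURCE A (Python) =====
-- def ldc(entry):
--     state = 0
--     ldc_code = []
--     for position, character in enumerate(entry):
--         if state == 0 and character == "(":
--             state = 1
--             ldc_code.append(character)
--         elif state == 1 and character.isnumeric() and position <= 3:
--             ldc_code.append(character)
--         elif state == 1 and character == ")":
--             state = 2
--             ldc_code.append(character)
--             return True, 0, position
--         else:
--             break
--     return False, -1, -1
-- ===== SOURCE B (Python) =====
-- def ldc(entry):
--     # A valid code prefix is exactly "(" + k numeric chars + ")" with 0 <= k <= 3: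
--     # enumerate the four candidate shapes and test each by slicing.
--     if entry[:1] == "(":
--         for k in range(4):
--             digits = entry[1:1 + k]
--             if len(digits) == k and all(c.isnumeric() for c in digits) and entry[1 + k:2 + k] == ")":
--                 return True, 0, 1 + k
--     return False, -1, -1
-- ===== Notes on version B (the rewrite author's own statement) =====
-- stated objective: alternative
-- what changed: Replaced the enumerate/state-machine scan (and its dead ldc_code accumulator) with an enumeration of the four possible valid shapes '(' + k digits + ')' for k in 0..3, each tested by slice comparison.
import Mathlib
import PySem

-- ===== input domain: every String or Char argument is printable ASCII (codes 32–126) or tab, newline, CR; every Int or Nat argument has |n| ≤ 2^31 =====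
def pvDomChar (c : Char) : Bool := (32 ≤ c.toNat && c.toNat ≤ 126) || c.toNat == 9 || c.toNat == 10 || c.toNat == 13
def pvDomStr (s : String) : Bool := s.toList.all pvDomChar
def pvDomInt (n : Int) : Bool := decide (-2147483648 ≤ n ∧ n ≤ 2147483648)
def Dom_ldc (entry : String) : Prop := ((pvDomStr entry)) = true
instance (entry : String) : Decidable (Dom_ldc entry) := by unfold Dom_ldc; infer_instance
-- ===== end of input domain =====

-- B replaces A's state-machine scan by enumerating the four valid shapes "(" + k digits + ")" (k = 0..3) tested by slicing; same values.

-- ===== PORT A =====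
-- A's for-loop with `state` and early return; `character.isnumeric()` is `Char.isDigit`,
-- exact on the printable-ASCII domain (the dead `ldc_code` list is not carried).
def ldcA_loop (state : Nat) (pos : Nat) : List Char → Bool × Int × Int
  | [] => (false, -1, -1)
  | c :: rest =>
    if state = 0 ∧ c = '(' then ldcA_loop 1 (pos + 1) rest
    else if state = 1 ∧ c.isDigit ∧ pos ≤ 3 then ldcA_loop state (pos + 1) rest
    else if state = 1 ∧ c = ')' then (true, 0, (pos : Int))
    else (false, -1, -1)

def ldc (entry : String) : Bool × Int × Int := ldcA_loop 0 0 entry.toList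

-- ===== PORT B =====
-- Source B's candidate test for one k: entry[1:1+k] (a slice with nonnegative in-range
-- bounds = (drop 1).take k), its length/all-numeric check, and entry[1+k:2+k] == ")".
def ldcB_try (cs : List Char) (k : Nat) : Bool :=
  let digits := (cs.drop 1).take k
  digits.length = k && digits.all Char.isDigit && ((cs.drop (1 + k)).take 1 = [')'])

-- Source B's `for k in range(4)` with early return, over the remaining candidate list.
def ldcB_find (cs : List Char) : List Nat → Bool × Int × Int
  | [] => (false, -1, -1)
  | k :: ks => if ldcB_try cs k then (true, 0, ((1 + k : Nat) : Int)) else ldcB_find cs ks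

def ldc_alt (entry : String) : Bool × Int × Int :=
  let cs := entry.toList
  if cs.take 1 = ['('] then ldcB_find cs [0, 1, 2, 3] else (false, -1, -1)

-- ===== PRECONDITION & SPEC =====
def Spec_ldc (entry : String) (out : Bool × Int × Int) : Prop := out = ldc_alt entry
instance (entry : String) (out : Bool × Int × Int) : Decidable (Spec_ldc entry out) := by unfold Spec_ldc; infer_instance

-- ===== CLAIM (what is proved, stated in full; the proofs are below) =====
def Claim_equal_ldc : Prop := ∀ (entry : String), Dom_ldc entry → Spec_ldc entry (ldc entry)

-- ===== LEMMAS AND PROOFS =====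
lemma ldc_main (rest : List Char) :
    ldcA_loop 1 1 rest = ldcB_find ('(' :: rest) [0, 1, 2, 3] := by
  rcases rest with _ | ⟨a, _ | ⟨b, _ | ⟨c, _ | ⟨d, tl⟩⟩⟩⟩
  · simp [ldcA_loop, ldcB_find, ldcB_try]
  ·
    by_cases ha' : a = ')'
    · simp_all [ldcA_loop, ldcB_find, ldcB_try]
    · by_cases ha : a.isDigit = true <;>
        simp_all [ldcA_loop, ldcB_find, ldcB_try]
  ·
    by_cases ha' : a = ')'
    · simp_all [ldcA_loop, ldcB_find, ldcB_try]
    · by_cases ha : a.isDigit = true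
      ·
        by_cases hb' : b = ')'
        · simp_all [ldcA_loop, ldcB_find, ldcB_try]
        · by_cases hb : b.isDigit = true <;>
            simp_all [ldcA_loop, ldcB_find, ldcB_try]
      · simp_all [ldcA_loop, ldcB_find, ldcB_try]
  ·
    by_cases ha' : a = ')'
    · simp_all [ldcA_loop, ldcB_find, ldcB_try]
    · by_cases ha : a.isDigit = true
      ·
        by_cases hb' : b = ')'
        · simp_all [ldcA_loop, ldcB_find, ldcB_try]
        · by_cases hb : b.isDigit = true
          ·
            by_cases hc' : c = ')'
            · simp_all [ldcA_loop, ldcB_find, ldcB_try]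
            · by_cases hc : c.isDigit = true <;>
                simp_all [ldcA_loop, ldcB_find, ldcB_try]
          · simp_all [ldcA_loop, ldcB_find, ldcB_try]
      · simp_all [ldcA_loop, ldcB_find, ldcB_try]
  ·
    by_cases ha' : a = ')'
    · simp_all [ldcA_loop, ldcB_find, ldcB_try]
    · by_cases ha : a.isDigit = true
      ·
        by_cases hb' : b = ')'
        · simp_all [ldcA_loop, ldcB_find, ldcB_try]
        · by_cases hb : b.isDigit = true
          ·
            by_cases hc' : c = ')'
            · simp_all [ldcA_loop, ldcB_find, ldcB_try]
            · by_cases hc : c.isDigit = true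
              ·
                by_cases hd' : d = ')'
                · simp_all [ldcA_loop, ldcB_find, ldcB_try]
                · by_cases hd : d.isDigit = true <;>
                    simp_all [ldcA_loop, ldcB_find, ldcB_try]
              · simp_all [ldcA_loop, ldcB_find, ldcB_try]
          · simp_all [ldcA_loop, ldcB_find, ldcB_try]
      · simp_all [ldcA_loop, ldcB_find, ldcB_try]


-- ===== VERDICT (by name: the statement is the Claim_ definition above) =====
theorem ldc_spec : Claim_equal_ldc := by
  intro entry _
  unfold Spec_ldc ldc ldc_alt
  cases hcs : entry.toList with
  | nil => simp [ldcA_loop]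
  | cons c rest =>
    by_cases h : c = '('
    · simp only [h, ldcA_loop]
      simp [ldc_main]
    · simp [ldcA_loop, h]
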